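-- pv_equiv track=rewrite | github.com/RAMESSESII2/CompetitiveProgramming | CodeChef/CC_Kprimes.py | prime_factorisation
-- ===== SOURCE A (Python) =====
-- def prime_factorisation(n):
--     largest_prime=[0]*(n+1)
--     for i in range(2,n+1):
--         if largest_prime[i]!=0:
--             continue
--         largest_prime[i]=i
--         for j in range(2*i, n+1, i):
--             largest_prime[j]=i
--
--     # i=2, largest_prime[2]=2, j=4,n+1,j+=i
--     #                              largest_prime[4]=2
--     #                              largest_prime[6]=3 // gets updated every step
--
--     prime_factors={}
--     for i in range(2, n+1):
--         factors=[0]*(n+1)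
--         x=i
--         #x=45
--         # dic={12:{2:2, 3:1}}
--         prime_factors[i]={}
--         while(x>1):
--             factors[largest_prime[x]]+=1
--             #factors[largest_prime[45]=5]=1
--             prime_factors[i][largest_prime[x]]=(factors[largest_prime[x]])
--
--             x=x//largest_prime[x]
--     A=[0]*(n+1)
--     for i in range(2,n+1):
--         count=0
--         for j in [*prime_factors[i]]:
--             count+=1
--         A[i]=count
--     return A
-- ===== SOURCE B (Python) =====
-- def prime_factorisation(n):
--     # Sieve over primes: whenever A[i] is still 0, i is prime; add 1 to every multiple of i.
--     A = [0] * (n + 1)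
--     for i in range(2, n + 1):
--         if A[i] == 0:
--             for j in range(i, n + 1, i):
--                 A[j] += 1
--     return A
-- ===== Notes on version B (the rewrite author's own statement) =====
-- stated objective: faster
-- what changed: Replaces A's three passes (smallest/largest-prime sieve, per-i repeated division building nested dicts, then a key-counting pass) by a single classic sieve that, for each prime p (detected as a cell still 0), increments a distinct-prime-factor counter at every multiple of p.
import Mathlib
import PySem

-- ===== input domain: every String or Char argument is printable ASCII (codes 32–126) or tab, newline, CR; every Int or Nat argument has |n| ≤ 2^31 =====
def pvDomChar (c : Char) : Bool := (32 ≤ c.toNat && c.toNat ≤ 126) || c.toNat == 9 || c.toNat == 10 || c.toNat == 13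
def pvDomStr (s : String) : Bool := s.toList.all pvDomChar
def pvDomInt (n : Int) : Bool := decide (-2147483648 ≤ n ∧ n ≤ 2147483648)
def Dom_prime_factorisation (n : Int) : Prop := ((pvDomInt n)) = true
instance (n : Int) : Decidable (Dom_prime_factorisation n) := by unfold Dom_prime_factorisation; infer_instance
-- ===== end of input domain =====

-- B replaces A's three passes (largest-prime sieve + per-i repeated division into nested
-- dicts + key counting) by one sieve incrementing a distinct-prime-factor counter (faster).

-- ===== PORT A =====
-- the 'while x > 1' loop of A; fuel = x.toNat bounds the iterations (x at least halves
-- each round), so the port returns exactly what Python computes wherever Python terminates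
def pvPfWhile (lp : List Int) (i : Int) : Nat → Int → List Int →
    PySem.Dict Int (PySem.Dict Int Int) → List Int × PySem.Dict Int (PySem.Dict Int Int)
  | 0, _, factors, pf => (factors, pf)
  | fuel + 1, x, factors, pf =>
    if 1 < x then
      let p := PySem.List.pyGetD lp x 0
      let c := PySem.List.pyGetD factors p 0 + 1
      let factors' := PySem.List.pySetD factors p c
      let pf' := pf.modify i PySem.Dict.empty (fun d => d.insert p c)
      pvPfWhile lp i fuel (PySem.Int.floordiv x p) factors' pf'
    else (factors, pf)

def prime_factorisation (n : Int) : List Int :=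
  let lp0 : List Int := List.replicate (n + 1).toNat 0
  let lp := (PySem.List.pyRange 2 (n + 1) 1).foldl
    (fun lp i =>
      if PySem.List.pyGetD lp i 0 ≠ 0 then lp
      else
        (PySem.List.pyRange (2 * i) (n + 1) i).foldl
          (fun l j => PySem.List.pySetD l j i) (PySem.List.pySetD lp i i))
    lp0
  let pf := (PySem.List.pyRange 2 (n + 1) 1).foldl
    (fun pf i =>
      let factors : List Int := List.replicate (n + 1).toNat 0
      (pvPfWhile lp i i.toNat i factors (pf.insert i PySem.Dict.empty)).2)
    PySem.Dict.empty
  let A0 : List Int := List.replicate (n + 1).toNat 0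
  (PySem.List.pyRange 2 (n + 1) 1).foldl
    (fun A i =>
      let count := ((pf.getD i PySem.Dict.empty).keys).foldl (fun c _ => c + 1) (0 : Int)
      PySem.List.pySetD A i count)
    A0

-- ===== PORT B =====
def prime_factorisation_alt (n : Int) : List Int :=
  (PySem.List.pyRange 2 (n + 1) 1).foldl
    (fun A i =>
      if PySem.List.pyGetD A i 0 = 0 then
        (PySem.List.pyRange i (n + 1) i).foldl
          (fun A j => PySem.List.pySetD A j (PySem.List.pyGetD A j 0 + 1)) A
      else A)
    (List.replicate (n + 1).toNat 0)

-- ===== PRECONDITION & SPEC =====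
def Spec_prime_factorisation (n : Int) (out : List Int) : Prop := out = prime_factorisation_alt n
instance (n : Int) (out : List Int) : Decidable (Spec_prime_factorisation n out) := by unfold Spec_prime_factorisation; infer_instance

-- ===== CLAIM (what is proved, stated in full; the proofs are below) =====
def Claim_equal_prime_factorisation : Prop := ∀ (n : Int), Dom_prime_factorisation n → Spec_prime_factorisation n (prime_factorisation n)

-- ===== LEMMAS AND PROOFS =====

-- greatest prime ≤ m dividing x (0 if none): what A's first sieve stores at x
def pvGp (m x : Nat) : Nat :=
  (List.range (m + 1)).foldl (fun a p => if Nat.Prime p ∧ p ∣ x then p else a) 0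

-- number of primes ≤ m dividing x: what B's sieve stores at x
def pvCp (m x : Nat) : Nat :=
  ((List.range (m + 1)).filter (fun p => decide (Nat.Prime p ∧ p ∣ x))).length

lemma pvGp_succ (m x : Nat) :
    pvGp (m + 1) x = if Nat.Prime (m + 1) ∧ (m + 1) ∣ x then m + 1 else pvGp m x := by
  simp [pvGp, List.range_succ]

lemma pvGp_one (x : Nat) : pvGp 1 x = 0 := by
  simp [pvGp, List.range_succ, Nat.not_prime_zero, Nat.not_prime_one]

lemma pvGp_eq_zero_iff (m x : Nat) :
    pvGp m x = 0 ↔ ∀ p, p ≤ m → Nat.Prime p → ¬ p ∣ x := by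
  induction m with
  | zero =>
    constructor
    · intro _ p hp hpp
      interval_cases p
      exact absurd hpp Nat.not_prime_zero
    · intro _
      simp [pvGp, Nat.not_prime_zero]
  | succ m ih =>
    by_cases hc : Nat.Prime (m + 1) ∧ (m + 1) ∣ x
    · simp only [pvGp_succ, if_pos hc]
      constructor
      · omega
      · intro h
        exact absurd (hc.2) (h (m + 1) le_rfl hc.1)
    · simp only [pvGp_succ, if_neg hc]
      rw [ih]
      constructor
      · intro h p hp hpp hd
        rcases Nat.lt_succ_iff_lt_or_eq.mp (Nat.lt_succ_of_le hp) with h' | h'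
        · exact h p (by omega) hpp hd
        · exact hc (h' ▸ ⟨hpp, hd⟩)
      · intro h p hp hpp hd
        exact h p (by omega) hpp hd

lemma pvGp_prime_dvd (m x : Nat) (h : pvGp m x ≠ 0) :
    (pvGp m x).Prime ∧ pvGp m x ∣ x := by
  induction m with
  | zero => simp [pvGp, Nat.not_prime_zero] at h
  | succ m ih =>
    rw [pvGp_succ] at h ⊢
    by_cases hc : Nat.Prime (m + 1) ∧ (m + 1) ∣ x
    · rw [if_pos hc]; exact ⟨hc.1, hc.2⟩
    · rw [if_neg hc] at h ⊢
      exact ih h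

lemma pvCp_succ (m x : Nat) :
    pvCp (m + 1) x = pvCp m x + if Nat.Prime (m + 1) ∧ (m + 1) ∣ x then 1 else 0 := by
  rw [pvCp, pvCp, List.range_succ, List.filter_append, List.length_append]
  split <;> simp_all

lemma pvCp_one (x : Nat) : pvCp 1 x = 0 := by
  simp [pvCp, List.range_succ, Nat.not_prime_zero, Nat.not_prime_one]

lemma pvCp_eq_zero_iff (m x : Nat) :
    pvCp m x = 0 ↔ ∀ p, p ≤ m → Nat.Prime p → ¬ p ∣ x := by
  simp only [pvCp, List.length_eq_zero_iff, List.filter_eq_nil_iff, List.mem_range,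
    decide_eq_true_eq, Nat.lt_succ_iff]
  tauto

-- i ≥ 2 is prime iff no prime < i divides it
lemma pvPrime_iff_no_small (i : Nat) (h2 : 2 ≤ i) :
    (∀ p, p ≤ i - 1 → Nat.Prime p → ¬ p ∣ i) ↔ i.Prime := by
  constructor
  · intro h
    by_contra hnp
    have h1 : i ≠ 1 := by omega
    have hpf := Nat.minFac_prime h1
    have hdvd := Nat.minFac_dvd i
    have hne : i.minFac ≠ i := by
      intro he
      exact hnp (Nat.prime_def_minFac.mpr ⟨h2, he⟩)
    have hle : i.minFac ≤ i := Nat.le_of_dvd (by omega) hdvd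
    exact h i.minFac (by omega) hpf hdvd
  · intro hp p hle hpp hdvd
    have := (Nat.prime_dvd_prime_iff_eq hpp hp).mp hdvd
    omega

lemma pvCp_eq_card (m x : Nat) (h2 : 2 ≤ x) (hx : x ≤ m) :
    pvCp m x = x.primeFactors.card := by
  have hnd : ((List.range (m + 1)).filter (fun p => decide (Nat.Prime p ∧ p ∣ x))).Nodup :=
    (List.nodup_range).filter _
  have hset : ((List.range (m + 1)).filter (fun p => decide (Nat.Prime p ∧ p ∣ x))).toFinset
      = x.primeFactors := by
    ext q
    simp only [List.mem_toFinset, List.mem_filter, List.mem_range, decide_eq_true_eq,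
      Nat.mem_primeFactors]
    constructor
    · rintro ⟨-, hq, hd⟩; exact ⟨hq, hd, by omega⟩
    · rintro ⟨hq, hd, -⟩
      exact ⟨by have := Nat.le_of_dvd (by omega) hd; omega, hq, hd⟩
  rw [pvCp, ← List.toFinset_card_of_nodup hnd, hset]

-- a Nodup Int list whose members are exactly the casts of a Finset ℕ has its card as length
lemma pvLen_eq_card (k : List Int) (s : Finset Nat) (hnd : k.Nodup)
    (h : ∀ q, q ∈ k ↔ ∃ p ∈ s, (p : Int) = q) : k.length = s.card := by
  have himg : k.toFinset = s.image (Nat.cast : Nat → Int) := by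
    ext q; simp [h q]
  rw [← List.toFinset_card_of_nodup hnd, himg,
    Finset.card_image_of_injective _ CharZero.cast_injective]

lemma pvGetD_set_self (l : List Int) (k : Nat) (v : Int) (h : k < l.length) :
    (l.set k v).getD k 0 = v := by
  simp [List.getD_eq_getElem?_getD, h]

lemma pvGetD_set_ne (l : List Int) (k x : Nat) (v : Int) (h : x ≠ k) :
    (l.set k v).getD x 0 = l.getD x 0 := by
  rw [List.getD_eq_getElem?_getD, List.getElem?_set_ne (fun he => h he.symm),
    ← List.getD_eq_getElem?_getD]

-- length through any fold of pySetD
lemma pvFoldl_pySetD_length (g : List Int → Int → Int) :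
    ∀ (js : List Int) (l : List Int),
      (js.foldl (fun l j => PySem.List.pySetD l j (g l j)) l).length = l.length := by
  intro js
  induction js with
  | nil => intro l; rfl
  | cons j js ih => intro l; rw [List.foldl_cons, ih, PySem.List.length_pySetD]

-- a fold writing f j at index j (value independent of the list): last-write-wins pointwise
lemma pvFoldl_setf_getD (f : Int → Int) :
    ∀ (js : List Int) (l : List Int) (x : Nat), (∀ j ∈ js, 0 ≤ j) → x < l.length →
      (js.foldl (fun l j => PySem.List.pySetD l j (f j)) l).getD x 0
        = if (x : Int) ∈ js then f x else l.getD x 0 := by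
  intro js
  induction js with
  | nil => intro l x _ _; simp
  | cons j js ih =>
    intro l x hjs hx
    have hj : 0 ≤ j := hjs j (by simp)
    obtain ⟨k, rfl⟩ : ∃ k : Nat, j = (k : Int) := ⟨j.toNat, (Int.toNat_of_nonneg hj).symm⟩
    rw [List.foldl_cons, PySem.List.pySetD_natCast,
      ih _ x (fun j hj' => hjs j (by simp [hj'])) (by simpa using hx)]
    by_cases hmem : (x : Int) ∈ js
    · rw [if_pos hmem, if_pos (by simp [hmem])]
    · rw [if_neg hmem]
      by_cases hxk : x = k
      · subst hxk
        rw [pvGetD_set_self l x _ hx, if_pos (by simp)]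
      · have hne : ¬ ((x : Int) ∈ ((k : Int) :: js)) := by
          simp only [List.mem_cons, hmem, or_false]
          exact_mod_cast hxk
        rw [pvGetD_set_ne l k x _ hxk, if_neg hne]

-- a fold incrementing index j, over distinct indices
lemma pvFoldl_incr_getD :
    ∀ (js : List Int) (l : List Int) (x : Nat), (∀ j ∈ js, 0 ≤ j) → x < l.length → js.Nodup →
      (js.foldl (fun l j => PySem.List.pySetD l j (PySem.List.pyGetD l j 0 + 1)) l).getD x 0
        = l.getD x 0 + if (x : Int) ∈ js then 1 else 0 := by
  intro js
  induction js with
  | nil => intro l x _ _ _; simp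
  | cons j js ih =>
    intro l x hjs hx hnd
    have hj : 0 ≤ j := hjs j (by simp)
    obtain ⟨k, rfl⟩ : ∃ k : Nat, j = (k : Int) := ⟨j.toNat, (Int.toNat_of_nonneg hj).symm⟩
    rw [List.foldl_cons, PySem.List.pyGetD_natCast, PySem.List.pySetD_natCast,
      ih _ x (fun j hj' => hjs j (by simp [hj'])) (by simpa using hx) hnd.of_cons]
    by_cases hxk : x = k
    · subst hxk
      have hmem : ¬ ((x : Int) ∈ js) := (List.nodup_cons.mp hnd).1
      rw [if_neg hmem, pvGetD_set_self l x _ hx, if_pos (by simp)]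
      ring
    · have hne : ¬ ((x : Int) = (k : Int)) := by exact_mod_cast hxk
      rw [pvGetD_set_ne l k x _ hxk]
      by_cases hmem : (x : Int) ∈ js <;> simp [hmem, hne]


-- ---- structured views of the two ports (definitionally equal, proved by rfl) ----

def pvLpStep (n : Int) (lp : List Int) (i : Int) : List Int :=
  if PySem.List.pyGetD lp i 0 ≠ 0 then lp
  else
    (PySem.List.pyRange (2 * i) (n + 1) i).foldl
      (fun l j => PySem.List.pySetD l j i) (PySem.List.pySetD lp i i)

def pvLpUpto (n m : Int) : List Int :=
  (PySem.List.pyRange 2 m 1).foldl (pvLpStep n) (List.replicate (n + 1).toNat 0)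

def pvPfStep (n : Int) (lp : List Int) (pf : PySem.Dict Int (PySem.Dict Int Int)) (i : Int) :
    PySem.Dict Int (PySem.Dict Int Int) :=
  (pvPfWhile lp i i.toNat i (List.replicate (n + 1).toNat 0) (pf.insert i PySem.Dict.empty)).2

def pvPfUpto (n m : Int) : PySem.Dict Int (PySem.Dict Int Int) :=
  (PySem.List.pyRange 2 m 1).foldl (pvPfStep n (pvLpUpto n (n + 1))) PySem.Dict.empty

def pvCount (d : PySem.Dict Int Int) : Int := d.keys.foldl (fun c _ => c + 1) 0

def pvAOut (n : Int) : List Int :=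
  (PySem.List.pyRange 2 (n + 1) 1).foldl
    (fun A i => PySem.List.pySetD A i (pvCount ((pvPfUpto n (n + 1)).getD i PySem.Dict.empty)))
    (List.replicate (n + 1).toNat 0)

lemma pvAOut_eq (n : Int) : prime_factorisation n = pvAOut n := rfl

def pvBStep (n : Int) (A : List Int) (i : Int) : List Int :=
  if PySem.List.pyGetD A i 0 = 0 then
    (PySem.List.pyRange i (n + 1) i).foldl
      (fun A j => PySem.List.pySetD A j (PySem.List.pyGetD A j 0 + 1)) A
  else A

def pvBUpto (n m : Int) : List Int :=
  (PySem.List.pyRange 2 m 1).foldl (pvBStep n) (List.replicate (n + 1).toNat 0)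

lemma pvBOut_eq (n : Int) : prime_factorisation_alt n = pvBUpto n (n + 1) := rfl

lemma pvCount_eq (d : PySem.Dict Int Int) : pvCount d = (d.keys.length : Int) := by
  rw [pvCount, PySem.List.foldl_add (g := fun _ => (1 : Int))]
  simp

lemma pvNodup_pyRange (a b s : Int) (hs : 0 < s) : (PySem.List.pyRange a b s).Nodup := by
  rw [PySem.List.pyRange_of_pos a b hs]
  refine List.Nodup.map ?_ List.nodup_range
  intro k1 k2 h
  have h' := add_left_cancel h
  exact_mod_cast mul_left_cancel₀ hs.ne' h'

lemma pvReplicate_getD (L x : Nat) : (List.replicate L (0 : Int)).getD x 0 = 0 := by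
  rw [List.getD_eq_getElem?_getD, List.getElem?_replicate]
  split <;> simp

-- ---- A's first sieve computes the greatest prime factor table ----

lemma pvLpUpto_inv (n : Int) (N : Nat) (hn : n = (N : Int)) (h2 : 2 ≤ N) :
    ∀ t : Nat, 1 ≤ t → t ≤ N →
      (pvLpUpto n ((t : Int) + 1)).length = N + 1 ∧
      (∀ x : Nat, x < 2 → (pvLpUpto n ((t : Int) + 1)).getD x 0 = 0) ∧
      (∀ x : Nat, 2 ≤ x → x ≤ N →
        (pvLpUpto n ((t : Int) + 1)).getD x 0 = ((pvGp t x : Nat) : Int)) := by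
  intro t h1 htN
  induction t, h1 using Nat.le_induction with
  | base =>
    have hr : PySem.List.pyRange 2 (((1 : Nat) : Int) + 1) 1 = [] :=
      PySem.List.pyRange_one_eq_nil (by norm_num)
    rw [pvLpUpto, hr, List.foldl_nil]
    refine ⟨by rw [List.length_replicate]; omega, fun x _ => pvReplicate_getD _ _,
      fun x _ _ => ?_⟩
    rw [pvGp_one, pvReplicate_getD]
    simp
  | succ t h1 ih =>
    obtain ⟨hlen, hlow, hmid⟩ := ih (by omega)
    have hi : ((t : Int) + 1) = (((t + 1 : Nat)) : Int) := by push_cast; ring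
    have hsplit : pvLpUpto n (((t + 1 : Nat) : Int) + 1)
        = pvLpStep n (pvLpUpto n ((t : Int) + 1)) (((t + 1 : Nat)) : Int) := by
      rw [pvLpUpto, pvLpUpto, show (((t + 1 : Nat) : Int) + 1) = ((t : Int) + 1) + 1 by push_cast; ring,
        PySem.List.pyRange_one_succ_right (by omega), List.foldl_append, List.foldl_cons,
        List.foldl_nil, hi]
    set L : List Int := pvLpUpto n ((t : Int) + 1) with hL
    have hguard : PySem.List.pyGetD L (((t + 1 : Nat)) : Int) 0 = ((pvGp t (t + 1) : Nat) : Int) := by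
      rw [PySem.List.pyGetD_natCast]
      exact hmid (t + 1) (by omega) (by omega)
    rw [hsplit]
    by_cases hz : pvGp t (t + 1) = 0
    · -- t+1 is prime: the inner loop stamps t+1 on all its multiples
      have hpr : (t + 1).Prime := by
        refine (pvPrime_iff_no_small (t + 1) (by omega)).mp ?_
        intro p hp hpp
        exact (pvGp_eq_zero_iff t (t + 1)).mp hz p (by omega) hpp
      have hpos : (0 : Int) < ((t + 1 : Nat) : Int) := by exact_mod_cast Nat.succ_pos t
      rw [pvLpStep, if_neg (by rw [hguard, hz]; simp)]
      set c : Int := (((t + 1 : Nat)) : Int) with hc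
      set L1 : List Int := PySem.List.pySetD L c c with hL1
      have hL1' : L1 = L.set (t + 1) c := by rw [hL1, hc, PySem.List.pySetD_natCast]
      have hlen1 : L1.length = N + 1 := by rw [hL1', List.length_set, hlen]
      set R : List Int := PySem.List.pyRange (2 * c) (n + 1) c with hR
      have hRpos : ∀ j ∈ R, 0 ≤ j := by
        intro j hj
        rw [hR, PySem.List.mem_pyRange_iff_of_pos hpos] at hj
        omega
      have hmem : ∀ x : Nat, ((x : Int) ∈ R ↔ ((t + 1) ∣ x ∧ 2 * (t + 1) ≤ x ∧ x ≤ N)) := by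
        intro x
        rw [hR, PySem.List.mem_pyRange_iff_of_pos hpos, hc]
        have hdvd_iff : (((t + 1 : Nat)) : Int) ∣ (x : Int) - 2 * ((t + 1 : Nat) : Int)
            ↔ (t + 1) ∣ x := by
          constructor
          · intro h
            have h2 : (((t + 1 : Nat)) : Int) ∣ 2 * ((t + 1 : Nat) : Int) := ⟨2, by ring⟩
            have h3 : (((t + 1 : Nat)) : Int) ∣ (x : Int) := by
              have := dvd_add h h2
              simpa using this
            exact_mod_cast h3
          · intro h
            exact dvd_sub (by exact_mod_cast h) ⟨2, by ring⟩
        rw [hdvd_iff]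
        constructor
        · rintro ⟨ha, hb, hd⟩
          exact ⟨hd, by exact_mod_cast ha, by omega⟩
        · rintro ⟨hd, ha, hb⟩
          exact ⟨by exact_mod_cast ha, by omega, hd⟩
      have hgd : ∀ x : Nat, x < L1.length →
          (R.foldl (fun l j => PySem.List.pySetD l j c) L1).getD x 0
            = if (x : Int) ∈ R then c else L1.getD x 0 :=
        fun x hx => pvFoldl_setf_getD (fun _ => c) R L1 x hRpos hx
      have hflen : (R.foldl (fun l j => PySem.List.pySetD l j c) L1).length = L1.length :=
        pvFoldl_pySetD_length (fun _ _ => c) R L1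
      refine ⟨by rw [hflen, hlen1], ?_, ?_⟩
      · intro x hx2
        rw [hgd x (by omega)]
        have hnotR : ¬ ((x : Int) ∈ R) := by
          rw [hmem]; rintro ⟨-, h, -⟩; omega
        rw [if_neg hnotR, hL1', pvGetD_set_ne L _ _ _ (by omega)]
        exact hlow x hx2
      · intro x hx2 hxN
        rw [hgd x (by omega)]
        by_cases hdv : (t + 1) ∣ x
        · by_cases hbig : 2 * (t + 1) ≤ x
          · have hin : (x : Int) ∈ R := (hmem x).mpr ⟨hdv, hbig, hxN⟩
            rw [if_pos hin, pvGp_succ, if_pos ⟨hpr, hdv⟩, hc]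
          · have hnin : ¬ ((x : Int) ∈ R) := by rw [hmem]; rintro ⟨-, h, -⟩; omega
            have hxeq : x = t + 1 := by
              obtain ⟨k, hk⟩ := hdv
              match k with
              | 0 => omega
              | 1 => omega
              | (k + 2) =>
                have : (t + 1) * 2 ≤ (t + 1) * (k + 2) := Nat.mul_le_mul_left _ (by omega)
                omega
            rw [if_neg hnin, hL1', hxeq, pvGetD_set_self L _ _ (by omega), pvGp_succ,
              if_pos ⟨hpr, dvd_refl _⟩, hc]
        · have hnin : ¬ ((x : Int) ∈ R) := by rw [hmem]; rintro ⟨h, -, -⟩; exact hdv h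
          rw [if_neg hnin, hL1', pvGetD_set_ne L _ _ _ (fun (he : x = t + 1) => hdv (by rw [he])),
            hmid x hx2 hxN, pvGp_succ, if_neg (fun hco => hdv hco.2)]
    · -- t+1 is composite: nothing changes, and pvGp (t+1) agrees with pvGp t
      have hnpr : ¬ (t + 1).Prime := by
        intro hp
        exact hz ((pvGp_eq_zero_iff t (t + 1)).mpr
          ((pvPrime_iff_no_small (t + 1) (by omega)).mpr hp))
      rw [pvLpStep, if_pos (by rw [hguard]; exact_mod_cast hz)]
      refine ⟨hlen, hlow, ?_⟩
      intro x hx2 hxN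
      rw [pvGp_succ, if_neg (fun hco => hnpr hco.1)]
      exact hmid x hx2 hxN

-- final lp table
lemma pvLp_final (n : Int) (N : Nat) (hn : n = (N : Int)) (h2 : 2 ≤ N) :
    (pvLpUpto n (n + 1)).length = N + 1 ∧
    ∀ x : Nat, 2 ≤ x → x ≤ N →
      PySem.List.pyGetD (pvLpUpto n (n + 1)) (x : Int) 0 = ((pvGp N x : Nat) : Int) := by
  have h := pvLpUpto_inv n N hn h2 N (by omega) le_rfl
  have he : ((N : Int) + 1) = n + 1 := by omega
  rw [he] at h
  exact ⟨h.1, fun x hx hxN => by rw [PySem.List.pyGetD_natCast]; exact h.2.2 x hx hxN⟩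

lemma pvPfWhile_stop (lp : List Int) (i : Int) (f : Nat) (x : Int) (factors : List Int)
    (pf : PySem.Dict Int (PySem.Dict Int Int)) (hx : ¬ 1 < x) :
    pvPfWhile lp i (f + 1) x factors pf = (factors, pf) := by
  simp only [pvPfWhile, if_neg hx]

lemma pvPfWhile_go (lp : List Int) (i : Int) (f : Nat) (x : Int) (factors : List Int)
    (pf : PySem.Dict Int (PySem.Dict Int Int)) (hx : 1 < x) :
    pvPfWhile lp i (f + 1) x factors pf =
      pvPfWhile lp i f (PySem.Int.floordiv x (PySem.List.pyGetD lp x 0))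
        (PySem.List.pySetD factors (PySem.List.pyGetD lp x 0)
          (PySem.List.pyGetD factors (PySem.List.pyGetD lp x 0) 0 + 1))
        (pf.modify i PySem.Dict.empty
          (fun d => d.insert (PySem.List.pyGetD lp x 0)
            (PySem.List.pyGetD factors (PySem.List.pyGetD lp x 0) 0 + 1))) := by
  simp only [pvPfWhile, if_pos hx]

-- ---- A's while loop collects exactly the distinct prime factors as dict keys ----

lemma pvPfWhile_spec (lp : List Int) (N : Nat)
    (hlp : ∀ x : Nat, 2 ≤ x → x ≤ N →
      PySem.List.pyGetD lp (x : Int) 0 = ((pvGp N x : Nat) : Int)) :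
    ∀ m : Nat, 1 ≤ m → m ≤ N → ∀ fuel : Nat, m ≤ fuel →
      ∀ (i : Int) (factors : List Int) (pf : PySem.Dict Int (PySem.Dict Int Int)),
      (∀ i' : Int, i' ≠ i →
        (pvPfWhile lp i fuel (m : Int) factors pf).2.getD i' PySem.Dict.empty
          = pf.getD i' PySem.Dict.empty) ∧
      ((pf.getD i PySem.Dict.empty).keys.Nodup →
        ((pvPfWhile lp i fuel (m : Int) factors pf).2.getD i PySem.Dict.empty).keys.Nodup ∧
        ∀ q : Int,
          q ∈ ((pvPfWhile lp i fuel (m : Int) factors pf).2.getD i PySem.Dict.empty).keys ↔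
            q ∈ (pf.getD i PySem.Dict.empty).keys ∨ ∃ p ∈ m.primeFactors, (p : Int) = q) := by
  intro m
  induction m using Nat.strong_induction_on with
  | _ m IH =>
    intro h1 hmN fuel hfuel i factors pf
    rcases Nat.lt_or_ge m 2 with hm2 | hm2
    · have hm : m = 1 := by omega
      subst hm
      cases fuel with
      | zero => omega
      | succ f =>
        rw [pvPfWhile_stop lp i f _ factors pf (by norm_num)]
        exact ⟨fun i' _ => rfl, fun hnd => ⟨hnd, fun q => by simp⟩⟩
    · cases fuel with
      | zero => omega
      | succ f =>
        have hx : (1 : Int) < ((m : Nat) : Int) := by exact_mod_cast hm2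
        have hpv : PySem.List.pyGetD lp ((m : Nat) : Int) 0 = ((pvGp N m : Nat) : Int) :=
          hlp m hm2 hmN
        have hne0 : pvGp N m ≠ 0 := by
          intro h0
          have hall := (pvGp_eq_zero_iff N m).mp h0
          have hmf := Nat.minFac_prime (show m ≠ 1 by omega)
          exact hall m.minFac
            (le_trans (Nat.le_of_dvd (by omega) (Nat.minFac_dvd m)) hmN) hmf (Nat.minFac_dvd m)
        obtain ⟨hpp, hpd⟩ := pvGp_prime_dvd N m hne0
        set p₀ := pvGp N m with hp₀
        have hp2 : 2 ≤ p₀ := hpp.two_le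
        have hdivc : PySem.Int.floordiv ((m : Nat) : Int) ((p₀ : Nat) : Int)
            = ((m / p₀ : Nat) : Int) := PySem.Int.floordiv_natCast m p₀
        have hm'1 : 1 ≤ m / p₀ := Nat.div_pos (Nat.le_of_dvd (by omega) hpd) (by omega)
        have hm'lt : m / p₀ < m := Nat.div_lt_self (by omega) (by omega)
        rw [pvPfWhile_go lp i f _ factors pf hx, hpv, hdivc]
        obtain ⟨IH1, IH2⟩ := IH (m / p₀) hm'lt hm'1
          (le_trans (Nat.div_le_self _ _) hmN) f (by omega) i _ _
        constructor
        · intro i' hne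
          rw [IH1 i' hne, PySem.Dict.getD_modify_of_ne pf _ _ hne]
        · intro hnd
          have hd' : (pf.modify i PySem.Dict.empty
                (fun d => d.insert ((p₀ : Nat) : Int)
                  (PySem.List.pyGetD factors ((p₀ : Nat) : Int) 0 + 1))).getD i PySem.Dict.empty
              = (pf.getD i PySem.Dict.empty).insert ((p₀ : Nat) : Int)
                  (PySem.List.pyGetD factors ((p₀ : Nat) : Int) 0 + 1) :=
            PySem.Dict.getD_modify_self pf i PySem.Dict.empty _
          obtain ⟨IH2a, IH2b⟩ := IH2 (by rw [hd']; exact PySem.Dict.nodup_keys_insert _ _ _ hnd)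
          refine ⟨IH2a, fun q => ?_⟩
          rw [IH2b q, hd', PySem.Dict.mem_keys_insert]
          have hpf : m.primeFactors = (m / p₀).primeFactors ∪ {p₀} := by
            calc m.primeFactors = ((m / p₀) * p₀).primeFactors := by rw [Nat.div_mul_cancel hpd]
              _ = (m / p₀).primeFactors ∪ p₀.primeFactors :=
                  Nat.primeFactors_mul (by omega) (by omega)
              _ = (m / p₀).primeFactors ∪ {p₀} := by rw [hpp.primeFactors]
          rw [hpf]
          simp only [Finset.mem_union, Finset.mem_singleton]
          constructor
          · rintro ((rfl | hq) | ⟨p, hp, rfl⟩)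
            · exact Or.inr ⟨p₀, Or.inr rfl, rfl⟩
            · exact Or.inl hq
            · exact Or.inr ⟨p, Or.inl hp, rfl⟩
          · rintro (hq | ⟨p, (hp | rfl), rfl⟩)
            · exact Or.inl (Or.inr hq)
            · exact Or.inr ⟨p, hp, rfl⟩
            · exact Or.inl (Or.inl rfl)

-- ---- the outer dict loop ----

lemma pvPfUpto_inv (n : Int) (N : Nat) (hn : n = (N : Int)) (h2 : 2 ≤ N) :
    ∀ t : Nat, 1 ≤ t → t ≤ N → ∀ i' : Nat, 2 ≤ i' → i' ≤ t →
      ((pvPfUpto n ((t : Int) + 1)).getD (i' : Int) PySem.Dict.empty).keys.Nodup ∧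
      (∀ q : Int, q ∈ ((pvPfUpto n ((t : Int) + 1)).getD (i' : Int) PySem.Dict.empty).keys ↔
        ∃ p ∈ i'.primeFactors, (p : Int) = q) := by
  intro t h1 htN
  induction t, h1 using Nat.le_induction with
  | base => intro i' hi2 hi1; omega
  | succ t h1 ih =>
    intro i' hi2 hit
    have hsplit : pvPfUpto n (((t + 1 : Nat) : Int) + 1)
        = pvPfStep n (pvLpUpto n (n + 1)) (pvPfUpto n ((t : Int) + 1)) (((t + 1 : Nat)) : Int) := by
      rw [pvPfUpto, pvPfUpto,
        show (((t + 1 : Nat) : Int) + 1) = ((t : Int) + 1) + 1 by push_cast; ring,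
        PySem.List.pyRange_one_succ_right (by omega), List.foldl_append, List.foldl_cons,
        List.foldl_nil, show ((t : Int) + 1) = (((t + 1 : Nat)) : Int) by push_cast; ring]
    rw [hsplit, pvPfStep]
    have hfu : ((((t + 1 : Nat)) : Int)).toNat = t + 1 := by simp
    rw [hfu]
    obtain ⟨hlpl, hlpv⟩ := pvLp_final n N hn h2
    have hws := pvPfWhile_spec (pvLpUpto n (n + 1)) N hlpv (t + 1) (by omega) (by omega)
      (t + 1) le_rfl (((t + 1 : Nat)) : Int) (List.replicate (n + 1).toNat 0)
      ((pvPfUpto n ((t : Int) + 1)).insert (((t + 1 : Nat)) : Int) PySem.Dict.empty)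
    by_cases hieq : i' = t + 1
    · subst hieq
      have hbase : ((pvPfUpto n ((t : Int) + 1)).insert (((t + 1 : Nat)) : Int)
            PySem.Dict.empty).getD (((t + 1 : Nat)) : Int) PySem.Dict.empty = PySem.Dict.empty :=
        PySem.Dict.getD_insert_self _ _ _ _
      obtain ⟨hnd, hmem⟩ := hws.2 (by rw [hbase]; simp)
      exact ⟨hnd, fun q => by rw [hmem q, hbase]; simp⟩
    · have hne : ((i' : Nat) : Int) ≠ (((t + 1 : Nat)) : Int) := by exact_mod_cast hieq
      rw [hws.1 _ hne, PySem.Dict.getD_insert_of_ne _ _ _ hne]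
      exact ih (by omega) i' hi2 (by omega)

-- ---- entries of port A ----

lemma pvPortA_entries (n : Int) (N : Nat) (hn : n = (N : Int)) (h2 : 2 ≤ N) :
    (prime_factorisation n).length = N + 1 ∧
    ∀ x : Nat, x < N + 1 →
      (prime_factorisation n).getD x 0
        = if 2 ≤ x then ((x.primeFactors.card : Nat) : Int) else 0 := by
  have hjs : ∀ j ∈ PySem.List.pyRange 2 (n + 1) 1, 0 ≤ j := by
    intro j hj; rw [PySem.List.mem_pyRange_one] at hj; omega
  have hlenr : (List.replicate (n + 1).toNat (0 : Int)).length = N + 1 := by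
    rw [List.length_replicate]; omega
  have hgd : ∀ x : Nat, x < (List.replicate (n + 1).toNat (0 : Int)).length →
      ((PySem.List.pyRange 2 (n + 1) 1).foldl
        (fun A i => PySem.List.pySetD A i
          (pvCount ((pvPfUpto n (n + 1)).getD i PySem.Dict.empty)))
        (List.replicate (n + 1).toNat 0)).getD x 0
      = if (x : Int) ∈ PySem.List.pyRange 2 (n + 1) 1 then
          pvCount ((pvPfUpto n (n + 1)).getD (x : Int) PySem.Dict.empty)
        else (List.replicate (n + 1).toNat (0 : Int)).getD x 0 :=
    fun x hx => pvFoldl_setf_getD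
      (fun i => pvCount ((pvPfUpto n (n + 1)).getD i PySem.Dict.empty)) _ _ x hjs hx
  have hlen : ((PySem.List.pyRange 2 (n + 1) 1).foldl
      (fun A i => PySem.List.pySetD A i
        (pvCount ((pvPfUpto n (n + 1)).getD i PySem.Dict.empty)))
      (List.replicate (n + 1).toNat 0)).length
      = (List.replicate (n + 1).toNat (0 : Int)).length :=
    pvFoldl_pySetD_length
      (fun _ i => pvCount ((pvPfUpto n (n + 1)).getD i PySem.Dict.empty)) _ _
  rw [pvAOut_eq, pvAOut]
  refine ⟨by rw [hlen, hlenr], ?_⟩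
  intro x hx
  rw [hgd x (by omega)]
  by_cases hx2 : 2 ≤ x
  · have hin : (x : Int) ∈ PySem.List.pyRange 2 (n + 1) 1 := by
      rw [PySem.List.mem_pyRange_one]; omega
    rw [if_pos hin, if_pos hx2, pvCount_eq]
    have hinv := pvPfUpto_inv n N hn h2 N (by omega) le_rfl x hx2 (by omega)
    rw [show ((N : Int) + 1) = n + 1 by omega] at hinv
    rw [pvLen_eq_card _ _ hinv.1 hinv.2]
  · have hnin : ¬ ((x : Int) ∈ PySem.List.pyRange 2 (n + 1) 1) := by
      rw [PySem.List.mem_pyRange_one]; omega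
    rw [if_neg hnin, if_neg hx2, pvReplicate_getD]

-- ---- B's sieve counts primes dividing each index ----

lemma pvBUpto_inv (n : Int) (N : Nat) (hn : n = (N : Int)) (h2 : 2 ≤ N) :
    ∀ t : Nat, 1 ≤ t → t ≤ N →
      (pvBUpto n ((t : Int) + 1)).length = N + 1 ∧
      (∀ x : Nat, x < 2 → (pvBUpto n ((t : Int) + 1)).getD x 0 = 0) ∧
      (∀ x : Nat, 2 ≤ x → x ≤ N →
        (pvBUpto n ((t : Int) + 1)).getD x 0 = ((pvCp t x : Nat) : Int)) := by
  intro t h1 htN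
  induction t, h1 using Nat.le_induction with
  | base =>
    have hr : PySem.List.pyRange 2 (((1 : Nat) : Int) + 1) 1 = [] :=
      PySem.List.pyRange_one_eq_nil (by norm_num)
    rw [pvBUpto, hr, List.foldl_nil]
    refine ⟨by rw [List.length_replicate]; omega, fun x _ => pvReplicate_getD _ _,
      fun x _ _ => ?_⟩
    rw [pvCp_one, pvReplicate_getD]
    simp
  | succ t h1 ih =>
    obtain ⟨hlen, hlow, hmid⟩ := ih (by omega)
    have hsplit : pvBUpto n (((t + 1 : Nat) : Int) + 1)
        = pvBStep n (pvBUpto n ((t : Int) + 1)) (((t + 1 : Nat)) : Int) := by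
      rw [pvBUpto, pvBUpto,
        show (((t + 1 : Nat) : Int) + 1) = ((t : Int) + 1) + 1 by push_cast; ring,
        PySem.List.pyRange_one_succ_right (by omega), List.foldl_append, List.foldl_cons,
        List.foldl_nil, show ((t : Int) + 1) = (((t + 1 : Nat)) : Int) by push_cast; ring]
    set L : List Int := pvBUpto n ((t : Int) + 1) with hL
    have hguard : PySem.List.pyGetD L (((t + 1 : Nat)) : Int) 0 = ((pvCp t (t + 1) : Nat) : Int) := by
      rw [PySem.List.pyGetD_natCast]
      exact hmid (t + 1) (by omega) (by omega)
    rw [hsplit]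
    by_cases hz : pvCp t (t + 1) = 0
    · -- t+1 is prime: the inner loop adds one at every multiple
      have hpr : (t + 1).Prime := by
        refine (pvPrime_iff_no_small (t + 1) (by omega)).mp ?_
        intro p hp hpp
        exact (pvCp_eq_zero_iff t (t + 1)).mp hz p (by omega) hpp
      have hpos : (0 : Int) < ((t + 1 : Nat) : Int) := by exact_mod_cast Nat.succ_pos t
      rw [pvBStep, if_pos (by rw [hguard, hz]; simp)]
      set c : Int := (((t + 1 : Nat)) : Int) with hc
      set R : List Int := PySem.List.pyRange c (n + 1) c with hR
      have hRpos : ∀ j ∈ R, 0 ≤ j := by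
        intro j hj
        rw [hR, PySem.List.mem_pyRange_iff_of_pos hpos] at hj
        omega
      have hRnd : R.Nodup := pvNodup_pyRange _ _ _ hpos
      have hmem : ∀ x : Nat, ((x : Int) ∈ R ↔ ((t + 1) ∣ x ∧ t + 1 ≤ x ∧ x ≤ N)) := by
        intro x
        rw [hR, PySem.List.mem_pyRange_iff_of_pos hpos, hc]
        have hdvd_iff : (((t + 1 : Nat)) : Int) ∣ (x : Int) - ((t + 1 : Nat) : Int)
            ↔ (t + 1) ∣ x := by
          constructor
          · intro h
            have h3 : (((t + 1 : Nat)) : Int) ∣ (x : Int) := by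
              have := dvd_add h (dvd_refl (((t + 1 : Nat)) : Int))
              simpa using this
            exact_mod_cast h3
          · intro h
            exact dvd_sub (by exact_mod_cast h) (dvd_refl _)
        rw [hdvd_iff]
        constructor
        · rintro ⟨ha, hb, hd⟩
          exact ⟨hd, by exact_mod_cast ha, by omega⟩
        · rintro ⟨hd, ha, hb⟩
          exact ⟨by exact_mod_cast ha, by omega, hd⟩
      have hgd : ∀ x : Nat, x < L.length →
          (R.foldl (fun A j => PySem.List.pySetD A j (PySem.List.pyGetD A j 0 + 1)) L).getD x 0
            = L.getD x 0 + if (x : Int) ∈ R then 1 else 0 :=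
        fun x hx => pvFoldl_incr_getD R L x hRpos hx hRnd
      have hflen : (R.foldl (fun A j => PySem.List.pySetD A j (PySem.List.pyGetD A j 0 + 1)) L).length
          = L.length := pvFoldl_pySetD_length (fun A j => PySem.List.pyGetD A j 0 + 1) R L
      refine ⟨by rw [hflen, hlen], ?_, ?_⟩
      · intro x hx2
        rw [hgd x (by omega)]
        have hnin : ¬ ((x : Int) ∈ R) := by rw [hmem]; rintro ⟨-, h, -⟩; omega
        rw [if_neg hnin, hlow x hx2, add_zero]
      · intro x hx2 hxN
        rw [hgd x (by omega), hmid x hx2 hxN, pvCp_succ]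
        by_cases hdv : (t + 1) ∣ x
        · have hin : (x : Int) ∈ R := (hmem x).mpr ⟨hdv, Nat.le_of_dvd (by omega) hdv, hxN⟩
          rw [if_pos hin, if_pos ⟨hpr, hdv⟩]
          push_cast
          ring
        · have hnin : ¬ ((x : Int) ∈ R) := by rw [hmem]; rintro ⟨h, -, -⟩; exact hdv h
          rw [if_neg hnin, if_neg (fun hco => hdv hco.2)]
          push_cast
          ring
    · -- t+1 composite: nothing changes
      have hnpr : ¬ (t + 1).Prime := by
        intro hp
        exact hz ((pvCp_eq_zero_iff t (t + 1)).mpr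
          ((pvPrime_iff_no_small (t + 1) (by omega)).mpr hp))
      rw [pvBStep, if_neg (by rw [hguard]; exact_mod_cast hz)]
      refine ⟨hlen, hlow, ?_⟩
      intro x hx2 hxN
      rw [pvCp_succ, if_neg (fun hco => hnpr hco.1)]
      rw [add_zero]
      exact hmid x hx2 hxN

lemma pvPortB_entries (n : Int) (N : Nat) (hn : n = (N : Int)) (h2 : 2 ≤ N) :
    (prime_factorisation_alt n).length = N + 1 ∧
    ∀ x : Nat, x < N + 1 →
      (prime_factorisation_alt n).getD x 0
        = if 2 ≤ x then ((x.primeFactors.card : Nat) : Int) else 0 := by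
  have hinv := pvBUpto_inv n N hn h2 N (by omega) le_rfl
  rw [show ((N : Int) + 1) = n + 1 by omega] at hinv
  obtain ⟨hlen, hlow, hmid⟩ := hinv
  rw [pvBOut_eq]
  refine ⟨hlen, ?_⟩
  intro x hx
  by_cases hx2 : 2 ≤ x
  · rw [if_pos hx2, hmid x hx2 (by omega), pvCp_eq_card N x hx2 (by omega)]
  · rw [if_neg hx2, hlow x (by omega)]

theorem prime_factorisation_spec : Claim_equal_prime_factorisation := by
  intro n _
  unfold Spec_prime_factorisation
  rcases lt_or_ge n 2 with hn2 | hn2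
  · have hr : PySem.List.pyRange 2 (n + 1) 1 = [] := PySem.List.pyRange_one_eq_nil (by omega)
    simp only [prime_factorisation, prime_factorisation_alt, hr, List.foldl_nil]
  · set N : Nat := n.toNat with hN
    have hn : n = (N : Int) := by omega
    have h2 : 2 ≤ N := by omega
    obtain ⟨hlA, hA⟩ := pvPortA_entries n N hn h2
    obtain ⟨hlB, hB⟩ := pvPortB_entries n N hn h2
    apply List.ext_getElem (by omega)
    intro x hx1 hx2
    have e1 : (prime_factorisation n)[x] = (prime_factorisation n).getD x 0 :=
      (List.getD_eq_getElem _ _ hx1).symm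
    have e2 : (prime_factorisation_alt n)[x] = (prime_factorisation_alt n).getD x 0 :=
      (List.getD_eq_getElem _ _ hx2).symm
    rw [e1, e2, hA x (by omega), hB x (by omega)]
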